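-- pv_equiv track=rewrite | github.com/linhdvu14/cp-sols | sols/CodeForces/1514_d2/C_Product_1_Modulo_N.py | solve
-- ===== SOURCE A (Python) =====
-- from math import gcd
--
-- def solve(N):
--     res = set()
--     p = 1
--     for a in range(1, N):
--         if gcd(a, N) == 1:
--             res.add(a)
--             p = (p * a) % N
--     if p > 1: res.remove(p)
--     return sorted(list(res))
-- ===== SOURCE B (Python) =====
-- def solve(N):
--     if N < 2:
--         return []
--     # factorize N once; coprimality = not divisible by any prime factor (no per-element gcd)
--     primes = []
--     n, d = N, 2
--     while d * d <= n:
--         if n % d == 0: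
--             primes.append(d)
--             while n % d == 0:
--                 n //= d
--         d += 1
--     if n > 1:
--         primes.append(n)
--     res = []
--     p = 1
--     for a in range(1, N):
--         if all(a % q for q in primes):
--             res.append(a)
--             p = p * a % N
--     if p > 1:
--         res.remove(p)
--     return res
-- ===== Notes on version B (the rewrite author's own statement) =====
-- stated objective: alternative
-- what changed: B factorizes N once by trial division and tests coprimality of each residue by divisibility against that prime list (no gcd calls), building the result list already in increasing order so the final set+sort of A disappears.
import Mathlib
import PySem

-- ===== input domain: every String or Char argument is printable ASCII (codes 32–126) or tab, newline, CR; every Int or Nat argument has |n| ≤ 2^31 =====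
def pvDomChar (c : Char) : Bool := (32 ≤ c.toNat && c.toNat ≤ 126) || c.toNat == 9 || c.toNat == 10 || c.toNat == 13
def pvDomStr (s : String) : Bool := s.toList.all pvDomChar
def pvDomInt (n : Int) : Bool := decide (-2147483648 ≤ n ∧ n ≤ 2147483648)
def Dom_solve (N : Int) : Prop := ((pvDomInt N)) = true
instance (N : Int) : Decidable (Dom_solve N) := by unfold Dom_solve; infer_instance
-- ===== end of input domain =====

-- B is an alternative algorithm: factorize N once and test coprimality by divisibility
-- against the prime factors (no gcd), building the result already in increasing order
-- (no set, no final sort). Return-value equivalence only (neither mutates arguments).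

-- ===== PORT A =====
def solve (N : Int) : List Int :=
  -- res = set(); p = 1; for a in range(1, N): if gcd(a, N) == 1: res.add(a); p = (p*a) % N
  let st := (PySem.List.pyRange 1 N 1).foldl
    (fun (st : PySem.Set Int × Int) a =>
      if Int.gcd a N = 1 then (PySem.Set.add st.1 a, PySem.Int.mod (st.2 * a) N) else st)
    (PySem.Set.empty, 1)
  -- if p > 1: res.remove(p)   (p is always a member here; KeyError would be `none`)
  let res := if st.2 > 1 then (PySem.Set.remove? st.1 st.2).getD st.1 else st.1
  PySem.List.sorted res (fun x => x) false

-- ===== PORT B =====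
-- inner `while n % d == 0: n //= d` of Source B (the 2 ≤ d / 0 < n guards only make it total;
-- they always hold at the call site)
def pvStrip (n d : Nat) : Nat :=
  if h : 2 ≤ d ∧ 0 < n ∧ n % d = 0 then pvStrip (n / d) d else n
termination_by n
decreasing_by exact Nat.div_lt_self h.2.1 (by omega)

theorem pvStrip_le (n d : Nat) : pvStrip n d ≤ n := by
  induction n using pvStrip.induct (d := d) with
  | case1 n h ih =>
    rw [pvStrip, dif_pos h]
    exact le_trans ih (Nat.div_le_self n d)
  | case2 n h => rw [pvStrip, dif_neg h]

-- outer trial-division loop of Source B: `while d*d <= n: …` then `if n > 1: primes.append(n)`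
def pvFacLoop (n d : Nat) : List Nat :=
  if hdd : d * d ≤ n then
    if n % d = 0 then d :: pvFacLoop (pvStrip n d) (d + 1)
    else pvFacLoop n (d + 1)
  else if 1 < n then [n] else []
termination_by n + 1 - d
decreasing_by
  · have h1 := pvStrip_le n d
    have h2 : d ≤ d * d ∨ d = 0 := by
      rcases Nat.eq_zero_or_pos d with h | h
      · exact Or.inr h
      · exact Or.inl (Nat.le_mul_of_pos_left d h)
    omega
  · have h2 : d ≤ d * d ∨ d = 0 := by
      rcases Nat.eq_zero_or_pos d with h | h
      · exact Or.inr h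
      · exact Or.inl (Nat.le_mul_of_pos_left d h)
    omega

def solve_alt (N : Int) : List Int :=
  if N < 2 then [] else
  let primes := pvFacLoop N.toNat 2
  -- res = []; p = 1; for a in range(1, N): if all(a % q for q in primes): res.append(a); p = p*a % N
  let st := (PySem.List.pyRange 1 N 1).foldl
    (fun (st : List Int × Int) a =>
      if primes.all (fun q => PySem.Int.mod a (q : Int) != 0) then
        (st.1 ++ [a], PySem.Int.mod (st.2 * a) N)
      else st)
    ([], 1)
  -- if p > 1: res.remove(p)   (p is always a member here; ValueError would be `none`)
  if st.2 > 1 then (PySem.List.remove? st.1 st.2).getD st.1 else st.1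

-- ===== PRECONDITION & SPEC =====
def Spec_solve (N : Int) (out : List Int) : Prop := out = solve_alt N
instance (N : Int) (out : List Int) : Decidable (Spec_solve N out) := by unfold Spec_solve; infer_instance

-- ===== CLAIM (what is proved, stated in full; the proofs are below) =====
def Claim_equal_solve : Prop := ∀ (N : Int), Dom_solve N → Spec_solve N (solve N)

-- ===== LEMMAS AND PROOFS =====

theorem pvStrip_pos (n d : Nat) (h : 0 < n) : 0 < pvStrip n d := by
  revert h
  induction n using pvStrip.induct (d := d) with
  | case1 n hg ih =>
    intro _
    rw [pvStrip, dif_pos hg]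
    exact ih (Nat.div_pos (Nat.le_of_dvd hg.2.1 (Nat.dvd_of_mod_eq_zero hg.2.2)) (by omega))
  | case2 n hg => intro h; rw [pvStrip, dif_neg hg]; exact h

theorem pvStrip_not_dvd (n d : Nat) (hd : 2 ≤ d) (hn : 0 < n) : ¬ d ∣ pvStrip n d := by
  revert hn
  induction n using pvStrip.induct (d := d) with
  | case1 n hg ih =>
    intro _
    rw [pvStrip, dif_pos hg]
    exact ih (Nat.div_pos (Nat.le_of_dvd hg.2.1 (Nat.dvd_of_mod_eq_zero hg.2.2)) (by omega))
  | case2 n hg =>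
    intro hn
    rw [pvStrip, dif_neg hg]
    intro hdvd
    exact hg ⟨hd, hn, Nat.dvd_iff_mod_eq_zero.mp hdvd⟩

theorem pvStrip_pow (n d : Nat) : ∃ j, n = d ^ j * pvStrip n d := by
  induction n using pvStrip.induct (d := d) with
  | case1 n hg ih =>
    rw [pvStrip, dif_pos hg]
    obtain ⟨j, hj⟩ := ih
    exact ⟨j + 1, by
      have hdvd : d ∣ n := Nat.dvd_of_mod_eq_zero hg.2.2
      have : d * (n / d) = n := Nat.mul_div_cancel' hdvd
      rw [pow_succ]
      calc n = d * (n / d) := this.symm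
        _ = d * (d ^ j * pvStrip (n / d) d) := by rw [← hj]
        _ = d ^ j * d * pvStrip (n / d) d := by ring⟩
  | case2 n hg =>
    rw [pvStrip, dif_neg hg]
    exact ⟨0, by simp⟩

-- prime-factor characterization of the trial-division loop
theorem mem_pvFacLoop_gen (n d : Nat) (hd : 2 ≤ d) (hn : 1 ≤ n)
    (hless : ∀ k, 2 ≤ k → k < d → ¬ k ∣ n) :
    ∀ q, q ∈ pvFacLoop n d ↔ q.Prime ∧ q ∣ n := by
  revert hd hn hless
  induction n, d using pvFacLoop.induct with
  | case1 n d hdd hmod ih =>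
    intro hd hn hless q
    have hdvd : d ∣ n := Nat.dvd_of_mod_eq_zero hmod
    have hdp : d.Prime := by
      rw [Nat.prime_def_lt]
      refine ⟨hd, fun m hm hmd => ?_⟩
      by_contra hm1
      have hm0 : m ≠ 0 := by rintro rfl; rw [Nat.zero_dvd] at hmd; omega
      exact hless m (by omega) hm (hmd.trans hdvd)
    obtain ⟨j, hj⟩ := pvStrip_pow n d
    have hn' : 0 < pvStrip n d := pvStrip_pos n d (by omega)
    have hndvd : ¬ d ∣ pvStrip n d := pvStrip_not_dvd n d hd (by omega)
    have hsub : pvStrip n d ∣ n := ⟨d ^ j, by rw [mul_comm]; exact hj⟩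
    have ihq := ih (by omega) (by omega) (fun k hk2 hkd hkdvd => by
      rcases (by omega : k < d ∨ k = d) with h | h
      · exact hless k hk2 h (hkdvd.trans hsub)
      · subst h; exact hndvd hkdvd) q
    rw [pvFacLoop, dif_pos hdd, if_pos hmod]
    simp only [List.mem_cons, ihq]
    constructor
    · rintro (rfl | ⟨hq, hq'⟩)
      · exact ⟨hdp, hdvd⟩
      · exact ⟨hq, hq'.trans hsub⟩
    · rintro ⟨hq, hqn⟩
      by_cases hqd : q = d
      · exact Or.inl hqd
      · refine Or.inr ⟨hq, ?_⟩
        rw [hj] at hqn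
        rcases (Nat.Prime.dvd_mul hq).mp hqn with h | h
        · exact absurd ((Nat.prime_dvd_prime_iff_eq hq hdp).mp (hq.dvd_of_dvd_pow h)) hqd
        · exact h
  | case2 n d hdd hmod ih =>
    intro hd hn hless q
    rw [pvFacLoop, dif_pos hdd, if_neg hmod]
    exact ih (by omega) hn (fun k hk2 hkd hkdvd => by
      rcases (by omega : k < d ∨ k = d) with h | h
      · exact hless k hk2 h hkdvd
      · subst h; exact hmod (Nat.dvd_iff_mod_eq_zero.mp hkdvd)) q
  | case3 n d hdd hlt =>
    intro hd hn hless q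
    rw [pvFacLoop, dif_neg hdd, if_pos hlt]
    have hnp : n.Prime := by
      by_contra hnp
      have hmf := Nat.minFac_prime (by omega : n ≠ 1)
      have h1 : n.minFac ^ 2 ≤ n := Nat.minFac_sq_le_self (by omega) hnp
      have h2 : 2 ≤ n.minFac := hmf.two_le
      have h3 := Nat.minFac_dvd n
      have h4 : d ≤ n.minFac := by
        by_contra h4
        exact hless n.minFac h2 (by omega) h3
      refine hdd ?_
      calc d * d ≤ n.minFac * n.minFac := Nat.mul_le_mul h4 h4
        _ = n.minFac ^ 2 := (pow_two _).symm
        _ ≤ n := h1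
    simp only [List.mem_singleton]
    constructor
    · rintro rfl; exact ⟨hnp, dvd_rfl⟩
    · rintro ⟨hq, hqn⟩; exact (Nat.prime_dvd_prime_iff_eq hq hnp).mp hqn
  | case4 n d hdd hlt =>
    intro hd hn hless q
    rw [pvFacLoop, dif_neg hdd, if_neg hlt]
    simp only [List.not_mem_nil, false_iff]
    rintro ⟨hq, hqn⟩
    have hn1 : n = 1 := by omega
    subst hn1
    have := hq.two_le
    have := Nat.dvd_one.mp hqn
    omega

theorem mem_pvFacLoop (m : Nat) (hm : 2 ≤ m) :
    ∀ q, q ∈ pvFacLoop m 2 ↔ q.Prime ∧ q ∣ m := by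
  exact mem_pvFacLoop_gen m 2 le_rfl (by omega) (fun k h2 hk => by omega)

theorem coprime_iff_no_prime_factor (a m : Nat) (ha : 0 < a) :
    Nat.gcd a m = 1 ↔ ∀ q, q.Prime → q ∣ m → ¬ q ∣ a := by
  constructor
  · intro hg q hq hqm hqa
    have : q ∣ Nat.gcd a m := Nat.dvd_gcd hqa hqm
    rw [hg] at this
    exact hq.one_lt.ne' (Nat.eq_one_of_dvd_one this ▸ rfl)
  · intro h
    by_contra hne
    have hpos : 0 < Nat.gcd a m := Nat.gcd_pos_of_pos_left m ha
    have h2 : 2 ≤ Nat.gcd a m := by omega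
    have hp := Nat.minFac_prime (by omega : Nat.gcd a m ≠ 1)
    have hd := Nat.minFac_dvd (Nat.gcd a m)
    exact h _ hp (hd.trans (Nat.gcd_dvd_right a m)) (hd.trans (Nat.gcd_dvd_left a m))

-- the two loop bodies agree pointwise on range(1, N)
theorem cond_iff (N a : Int) (h2 : 2 ≤ N) (h1 : 1 ≤ a) (hN : a < N) :
    (Int.gcd a N = 1) ↔
      ((pvFacLoop N.toNat 2).all (fun q => PySem.Int.mod a (q : Int) != 0) = true) := by
  have hg : Int.gcd a N = Nat.gcd a.toNat N.toNat := by unfold Int.gcd; congr 1 <;> omega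
  rw [hg, List.all_eq_true, coprime_iff_no_prime_factor a.toNat N.toNat (by omega)]
  constructor
  · intro h q hq
    rw [bne_iff_ne, Ne, PySem.Int.mod_eq_zero_iff_dvd]
    obtain ⟨hqp, hqd⟩ := (mem_pvFacLoop N.toNat (by omega) q).mp hq
    intro hdvd
    refine h q hqp hqd ?_
    have h5 : (q : Int) ∣ ((a.toNat : Nat) : Int) := by rwa [Int.toNat_of_nonneg (by omega)]
    exact_mod_cast h5
  · intro h q hqp hqd hqa
    have hq := (mem_pvFacLoop N.toNat (by omega) q).mpr ⟨hqp, hqd⟩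
    have h6 := h q hq
    rw [bne_iff_ne, Ne, PySem.Int.mod_eq_zero_iff_dvd] at h6
    refine h6 ?_
    have h7 : (q : Int) ∣ ((a.toNat : Nat) : Int) := Int.natCast_dvd_natCast.mpr hqa
    rwa [Int.toNat_of_nonneg (by omega)] at h7

-- both folds produce the same pair, given pointwise-equal tests and fresh increasing elements
theorem fold_eq (g : Int → Int → Int) (cA : Int → Prop) [DecidablePred cA] (cB : Int → Bool) :
    ∀ (L : List Int) (s : List Int) (p : Int),
    (∀ a ∈ L, cA a ↔ cB a = true) → (∀ a ∈ L, a ∉ s) → L.Pairwise (· < ·) →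
    L.foldl (fun st a => if cA a then (PySem.Set.add st.1 a, g st.2 a) else st) (s, p)
      = L.foldl (fun st a => if cB a then (st.1 ++ [a], g st.2 a) else st) (s, p) := by
  intro L
  induction L with
  | nil => intros; rfl
  | cons a L ih =>
    intro s p hC hmem hpw
    have hpw' := List.pairwise_cons.mp hpw
    simp only [List.foldl_cons]
    by_cases hca : cA a
    · rw [if_pos hca, if_pos ((hC a (by simp)).mp hca)]
      have hadd : PySem.Set.add s a = s ++ [a] := by
        simp [PySem.Set.add, hmem a (by simp)]
      rw [hadd]
      exact ih (s ++ [a]) (g p a) (fun b hb => hC b (by simp [hb]))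
        (fun b hb => by
          simp only [List.mem_append, List.mem_singleton]
          rintro (h | rfl)
          · exact hmem b (by simp [hb]) h
          · exact absurd (hpw'.1 b hb) (lt_irrefl b))
        hpw'.2
    · rw [if_neg hca, if_neg (by simpa using fun h => hca ((hC a (by simp)).mpr h))]
      exact ih s p (fun b hb => hC b (by simp [hb])) (fun b hb => hmem b (by simp [hb])) hpw'.2

-- the B-side fold appends exactly the filtered elements
theorem foldB_fst (cB : Int → Bool) (g : Int → Int → Int) :
    ∀ (L : List Int) (s : List Int) (p : Int),
    (L.foldl (fun st a => if cB a then (st.1 ++ [a], g st.2 a) else st) (s, p)).1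
      = s ++ L.filter cB := by
  intro L
  induction L with
  | nil => intro s p; simp
  | cons a L ih =>
    intro s p
    simp only [List.foldl_cons, List.filter_cons]
    by_cases h : cB a
    · rw [if_pos h, h, ih]
      simp
    · rw [if_neg h]
      simp only [Bool.not_eq_true] at h
      rw [h, ih]
      simp

-- ===== VERDICT (by name: the statement is the Claim_ definition above) =====
-- removing an element from a duplicate-free "set" list is first-occurrence removal
theorem discard_eq_erase (s : List Int) (x : Int) (h : s.Nodup) :
    PySem.Set.discard s x = s.erase x := by
  rw [List.Nodup.erase_eq_filter h]
  simp [PySem.Set.discard]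
  exact List.filter_congr (by intro a _; simp [bne])

-- ===== VERDICT (by name: the statement is the Claim_ definition above) =====
theorem solve_spec : Claim_equal_solve := by
  intro N _
  unfold Spec_solve
  by_cases hN : N < 2
  · simp only [solve, solve_alt, PySem.Set.empty]
    rw [if_pos hN, PySem.List.pyRange_one_eq_nil (by omega : N ≤ 1)]
    simp [PySem.List.sorted]
  · rw [not_lt] at hN
    simp only [solve, solve_alt, PySem.Set.empty]
    rw [if_neg (show ¬ N < 2 by omega)]
    have hcond : ∀ a ∈ PySem.List.pyRange 1 N 1,
        (Int.gcd a N = 1 ↔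
          ((pvFacLoop N.toNat 2).all (fun q => PySem.Int.mod a (q : Int) != 0) = true)) := by
      intro a ha
      have hm := PySem.List.mem_pyRange_one.mp ha
      exact cond_iff N a hN hm.1 hm.2
    rw [fold_eq (fun p a => PySem.Int.mod (p * a) N)
          (fun a => Int.gcd a N = 1)
          (fun a => (pvFacLoop N.toNat 2).all (fun q => PySem.Int.mod a (q : Int) != 0))
          (PySem.List.pyRange 1 N 1) [] 1 hcond (by simp)
          (PySem.List.pairwise_lt_pyRange_one 1 N)]
    set st := (PySem.List.pyRange 1 N 1).foldl
      (fun (st : List Int × Int) a =>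
        if (pvFacLoop N.toNat 2).all (fun q => PySem.Int.mod a (q : Int) != 0) then
          (st.1 ++ [a], PySem.Int.mod (st.2 * a) N)
        else st) ([], 1) with hst
    have hfst : st.1 = (PySem.List.pyRange 1 N 1).filter
        (fun a => (pvFacLoop N.toNat 2).all (fun q => PySem.Int.mod a (q : Int) != 0)) := by
      have h0 := foldB_fst
        (fun a => (pvFacLoop N.toNat 2).all (fun q => PySem.Int.mod a (q : Int) != 0))
        (fun p a => PySem.Int.mod (p * a) N) (PySem.List.pyRange 1 N 1) [] 1
      rw [List.nil_append] at h0
      rw [hst]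
      exact h0
    have hpw : st.1.Pairwise (· < ·) := by
      rw [hfst]
      exact (PySem.List.pairwise_lt_pyRange_one 1 N).filter _
    have hnodup : st.1.Nodup := hpw.imp (fun h => ne_of_lt h)
    by_cases hp : st.2 > 1
    · rw [if_pos hp, if_pos hp]
      by_cases hmem : st.2 ∈ st.1
      · rw [PySem.Set.remove?_of_mem hmem, PySem.List.remove?_eq_some_erase st.1 st.2 hmem,
            discard_eq_erase st.1 st.2 hnodup]
        simp only [Option.getD_some]
        exact PySem.List.sorted_eq_of_perm_of_pairwise_lt _ _ _ (List.Perm.refl _)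
          (List.Pairwise.sublist List.erase_sublist hpw)
      · rw [(PySem.Set.remove?_eq_none_iff st.1 st.2).mpr hmem,
            (PySem.List.remove?_eq_none_iff st.1 st.2).mpr hmem]
        simp only [Option.getD_none]
        exact PySem.List.sorted_eq_of_perm_of_pairwise_lt _ _ _ (List.Perm.refl _) hpw
    · rw [if_neg hp, if_neg hp]
      exact PySem.List.sorted_eq_of_perm_of_pairwise_lt _ _ _ (List.Perm.refl _) hpw
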